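-- pv_equiv track=rewrite | github.com/Enzo-Laborde/AutoSeqTools | AStools.py | gen_d
-- ===== SOURCE A (Python) =====
-- def gen_d(length):
-- 	"""
-- 	Generate the sequences d(n) of sequence using morphism found with the 'IFMorphism' function.
-- 	"""
--
-- 	### d(n) morphism of Sierpinsky word
-- 	# m = {'a': 'abc', 'b': 'bdd', 'c': 'efg', 'd': 'ddd', 'e': 'edh', 'f': 'ddf', 'g': 'ifg', 'h': 'edj', 'i': 'abj', 'j': 'hdj'}
-- 	# c = {
-- 	# 	'a': '++-+00+--',
-- 	# 	'b': '+00000000',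
-- 	# 	'c': '+0000-+--',
-- 	# 	'd': '000000000',
-- 	# 	'e': '+00000+0-',
-- 	# 	'f': '00000000-',
-- 	# 	'g': '++-00-+--',
-- 	# 	'h': '+0000000-',
-- 	# 	'i': '++-+0000-',
-- 	# 	'j': '+0-00000-' }
--
-- 	### d(n) morphism of Paper-Folding word
-- 	m = {'a': 'ab', 'b': 'cd', 'c': 'ef', 'd': 'gd', 'e': 'eb', 'f': 'ch', 'g': 'if', 'h': 'gh', 'i': 'ib'}
-- 	c = {
-- 		'a': '+0+0-+0+000-++0-+-0+00+00-0++-0+000+00+0-+000+000+00000-0++0-+0-',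
-- 		'b': '0++-0+00+00-0+00000+00+00-0++-0+0+-+0-0+000+000+0+-+0-000+000+0-',
-- 		'c': '0++-0+00+00-0+00000+00+00-0++-0+000+00+0-+000+000+00000-0++0-+00',
-- 		'd': '+00+-00+0000+0000-0+00+00-0++-0+0+-+0-0+000+000+0+-+0-000+000+0-',
-- 		'e': '0++-0+00+00-0+00000+00+00-0++-0+000+00+0-+000+000+00000-0++0-+0-',
-- 		'f': '0++-0+00+00-0+00000+00+00-0++-0+0+-+0-0+000+000+0+-+0-000+000+00',
-- 		'g': '0+00000+00000+000-0+00+00-0++-0+000+00+0-+000+000+00000-0++0-+00',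
-- 		'h': '+00+-00+0000+0000-0+00+00-0++-0+0+-+0-0+000+000+0+-+0-000+000+00',
-- 		'i': '0+00000+00000+000-0+00+00-0++-0+000+00+0-+000+000+00000-0++0-+0-' }
--
-- 	### d(n) morphism of Rudin-Shapiro word
-- 	# m = {'a': 'ab', 'b': 'cd', 'c': 'eb', 'd': 'ed', 'e': 'cb'}
-- 	# c = {
-- 	# 	'a': '+00+00000-++00-++00-+0+00+00+00+-0+00-+00+-0+0+0-0+00-+00+00+00+',
-- 	# 	'b': '0+0-0++-00+0+0-++00-+0+00+00+00+0+0-0++-00+0+0-+000+0-+00+00+00+',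
-- 	# 	'c': '-0+00-+00+-0+0+00+00-++-+00+000+0-+000+-+0-0+0+0-0+00-+00+00+00+',
-- 	# 	'd': '-0+00-+00+-0+0+00+00-++-+00+000+0+0-0++-00+0+0-+000+0-+00+00+00+',
-- 	# 	'e': '0+0-0++-00+0+0-++00-+0+00+00+00+-0+00-+00+-0+0+0-0+00-+00+00+00+' }
--
--
-- 	w = m['a']
-- 	d = ''
-- 	genLen = int((length - 1) / len(c['a'])) + 1
--
-- 	i = 1
-- 	while len(w) < genLen:
-- 		w += m[w[i]]
-- 		i += 1
--
-- 	for i in range(genLen):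
-- 		d += c[w[i]]
--
-- 	return d[:length]
-- ===== SOURCE B (Python) =====
-- def gen_d(length):
-- 	"""
-- 	Generate the sequences d(n) of sequence using morphism found with the 'IFMorphism' function.
-- 	"""
--
-- 	m = {'a': 'ab', 'b': 'cd', 'c': 'ef', 'd': 'gd', 'e': 'eb', 'f': 'ch', 'g': 'if', 'h': 'gh', 'i': 'ib'}
-- 	c = {
-- 		'a': '+0+0-+0+000-++0-+-0+00+00-0++-0+000+00+0-+000+000+00000-0++0-+0-',
-- 		'b': '0++-0+00+00-0+00000+00+00-0++-0+0+-+0-0+000+000+0+-+0-000+000+0-',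
-- 		'c': '0++-0+00+00-0+00000+00+00-0++-0+000+00+0-+000+000+00000-0++0-+00',
-- 		'd': '+00+-00+0000+0000-0+00+00-0++-0+0+-+0-0+000+000+0+-+0-000+000+0-',
-- 		'e': '0++-0+00+00-0+00000+00+00-0++-0+000+00+0-+000+000+00000-0++0-+0-',
-- 		'f': '0++-0+00+00-0+00000+00+00-0++-0+0+-+0-0+000+000+0+-+0-000+000+00',
-- 		'g': '0+00000+00000+000-0+00+00-0++-0+000+00+0-+000+000+00000-0++0-+00',
-- 		'h': '+00+-00+0000+0000-0+00+00-0++-0+0+-+0-0+000+000+0+-+0-000+000+00',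
-- 		'i': '0+00000+00000+000-0+00+00-0++-0+000+00+0-+000+000+00000-0++0-+0-' }
--
-- 	# number of morphism letters needed to cover `length` output characters
-- 	genLen = (length - 1) // len(c['a']) + 1
--
-- 	# iterate the morphism over the whole word at once; it is prolongable on 'a',
-- 	# so each round extends the previous word
-- 	w = 'a'
-- 	while len(w) < genLen:
-- 		w = ''.join(m[ch] for ch in w)
--
-- 	return ''.join(c[ch] for ch in w[:genLen])[:length]
-- ===== Notes on version B (the rewrite author's own statement) =====
-- stated objective: alternative
-- what changed: B grows the morphism fixed-point word by substituting the whole current word each round (w = join(m[ch] for ch in w), doubling its length) instead of A's per-step append of one letter's image with a running index, expands via a single join over w[:genLen] instead of an accumulating for-loop, and computes genLen with exact integer floor division instead of float division plus int().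
-- intended difference: For -62 <= length <= -1 A's int() truncation makes genLen 1, so A expands one letter and the negative slice returns a leftover chunk of the expansion (e.g. '+0' at length=-62), while B's floor division gives genLen <= 0 and B returns '', the intended empty output for a non-positive requested length. — e.g. on gen_d(-62): A returns "+0", B returns ""
import Mathlib
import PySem

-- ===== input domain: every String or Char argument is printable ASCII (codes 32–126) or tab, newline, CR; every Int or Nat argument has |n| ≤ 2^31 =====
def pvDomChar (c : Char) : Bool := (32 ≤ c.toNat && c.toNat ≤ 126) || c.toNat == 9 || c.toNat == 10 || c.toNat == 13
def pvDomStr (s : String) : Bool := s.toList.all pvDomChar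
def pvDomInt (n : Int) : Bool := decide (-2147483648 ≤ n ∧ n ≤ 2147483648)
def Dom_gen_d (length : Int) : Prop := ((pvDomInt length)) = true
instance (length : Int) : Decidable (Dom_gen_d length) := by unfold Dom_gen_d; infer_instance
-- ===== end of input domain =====

-- B builds the same morphism word by substituting the WHOLE current word each round
-- instead of appending one letter's image per step, and uses integer floor division
-- for genLen (different decomposition; B returns '' for negative lengths, see D_).

-- ===== PORT A =====
-- The two dicts of the Python source, as total functions on Char (only keys 'a'..'i'
-- ever occur; any other char would be a KeyError in Python — that path is unreachable,
-- encoded here as []).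
def mImg (ch : Char) : List Char :=
  if ch = 'a' then ['a', 'b']
  else if ch = 'b' then ['c', 'd']
  else if ch = 'c' then ['e', 'f']
  else if ch = 'd' then ['g', 'd']
  else if ch = 'e' then ['e', 'b']
  else if ch = 'f' then ['c', 'h']
  else if ch = 'g' then ['i', 'f']
  else if ch = 'h' then ['g', 'h']
  else if ch = 'i' then ['i', 'b']
  else []

def cImg (ch : Char) : List Char :=
  if ch = 'a' then "+0+0-+0+000-++0-+-0+00+00-0++-0+000+00+0-+000+000+00000-0++0-+0-".toList
  else if ch = 'b' then "0++-0+00+00-0+00000+00+00-0++-0+0+-+0-0+000+000+0+-+0-000+000+0-".toList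
  else if ch = 'c' then "0++-0+00+00-0+00000+00+00-0++-0+000+00+0-+000+000+00000-0++0-+00".toList
  else if ch = 'd' then "+00+-00+0000+0000-0+00+00-0++-0+0+-+0-0+000+000+0+-+0-000+000+0-".toList
  else if ch = 'e' then "0++-0+00+00-0+00000+00+00-0++-0+000+00+0-+000+000+00000-0++0-+0-".toList
  else if ch = 'f' then "0++-0+00+00-0+00000+00+00-0++-0+0+-+0-0+000+000+0+-+0-000+000+00".toList
  else if ch = 'g' then "0+00000+00000+000-0+00+00-0++-0+000+00+0-+000+000+00000-0++0-+00".toList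
  else if ch = 'h' then "+00+-00+0000+0000-0+00+00-0++-0+0+-+0-0+000+000+0+-+0-000+000+00".toList
  else if ch = 'i' then "0+00000+00000+000-0+00+00-0++-0+000+00+0-+000+000+00000-0++0-+0-".toList
  else []

-- A's while loop: `while len(w) < genLen: w += m[w[i]]; i += 1`.
-- The two inner dite guards (index in range, image nonempty) only make the recursion
-- total; on every reachable state they hold (proved below).
def growA (gl : Int) (w : List Char) (i : Nat) : List Char :=
  if _h : (w.length : Int) < gl then
    if _hch : i < w.length then
      if _hg : 0 < (mImg w[i]).length then growA gl (w ++ mImg w[i]) (i + 1) else w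
    else w
  else w
termination_by (gl - (w.length : Int)).toNat
decreasing_by simp only [List.length_append]; omega

def gen_d (length : Int) : String :=
  let w := mImg 'a'
  let d : List Char := []
  -- genLen = int((length - 1) / len(c['a'])) + 1; len(c['a']) = 64, and float division
  -- by 64 is exact on the domain, so int(…) is exact truncating division.
  let genLen : Int := PySem.Int.truncdiv (length - 1) 64 + 1
  let w := growA genLen w 1
  -- for i in range(genLen): d += c[w[i]]   (the index is always in range: len(w) ≥ genLen)
  let d := (PySem.List.pyRange 0 genLen 1).foldl
      (fun d i => d ++ cImg (PySem.List.pyGetD w i ' ')) d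
  String.ofList (PySem.List.slice d none (some length))   -- d[:length]

-- ===== PORT B =====
-- ''.join(m[ch] for ch in w)
def subw (w : List Char) : List Char := w.flatMap mImg

-- B's while loop: `while len(w) < genLen: w = subst(w)`.  The growth guard only makes
-- the recursion total; it holds on every reachable state (the word is nonempty).
def growB (gl : Int) (w : List Char) : List Char :=
  if _h : (w.length : Int) < gl ∧ w.length < (subw w).length then growB gl (subw w)
  else w
termination_by (gl - (w.length : Int)).toNat
decreasing_by omega

def gen_d_alt (length : Int) : String :=
  let genLen : Int := PySem.Int.floordiv (length - 1) 64 + 1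
  let w := growB genLen ['a']
  let d := (PySem.List.slice w none (some genLen)).flatMap cImg   -- join over w[:genLen]
  String.ofList (PySem.List.slice d none (some length))   -- d[:length]

-- ===== PRECONDITION & SPEC =====
-- For -62 ≤ length ≤ -1 A's int() truncation makes genLen 1, so A expands one letter and
-- the negative slice returns a leftover chunk of the expansion (e.g. "+0" at length = -62),
-- while B's floor division gives genLen ≤ 0 and B returns "", the intended empty output
-- for a non-positive requested length.
def D_gen_d (length : Int) : Prop := -62 ≤ length ∧ length ≤ -1
instance (length : Int) : Decidable (D_gen_d length) := by unfold D_gen_d; infer_instance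

def Spec_gen_d (length : Int) (out : String) : Prop := ¬ D_gen_d length → out = gen_d_alt length
instance (length : Int) (out : String) : Decidable (Spec_gen_d length out) := by unfold Spec_gen_d; infer_instance

def pvDiffWitness_gen_d : Int := (-62)
def pvDiffWitnessOut_gen_d : String × String := ("+0", "")

-- ===== CLAIM =====
def Claim_unchanged_gen_d : Prop := ∀ (length : Int), Dom_gen_d length → Spec_gen_d length (gen_d length)
def Claim_changed_gen_d : Prop := Dom_gen_d (pvDiffWitness_gen_d) ∧ D_gen_d (pvDiffWitness_gen_d) ∧ gen_d (pvDiffWitness_gen_d) = pvDiffWitnessOut_gen_d.1 ∧ gen_d_alt (pvDiffWitness_gen_d) = pvDiffWitnessOut_gen_d.2 ∧ pvDiffWitnessOut_gen_d.1 ≠ pvDiffWitnessOut_gen_d.2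
def Claim_exact_gen_d : Prop := ∀ (length : Int), Dom_gen_d length → D_gen_d length → gen_d length ≠ gen_d_alt length

-- ===== LEMMAS AND PROOFS =====

-- the nine letters that can ever occur in the morphism word
def keyList : List Char := ['a', 'b', 'c', 'd', 'e', 'f', 'g', 'h', 'i']

def Good (w : List Char) : Prop := ∀ ch ∈ w, ch ∈ keyList

lemma key_step : ∀ ch ∈ keyList, (mImg ch).length = 2 ∧ ∀ c' ∈ mImg ch, c' ∈ keyList := by
  intro ch hch
  fin_cases hch <;>
    exact ⟨rfl, by intro c' hc'; fin_cases hc' <;> decide⟩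

lemma subw_append (u v : List Char) : subw (u ++ v) = subw u ++ subw v :=
  List.flatMap_append

lemma len_subw (w : List Char) (h : Good w) : (subw w).length = 2 * w.length := by
  induction w with
  | nil => rfl
  | cons ch w ih =>
    have hk := key_step ch (h ch List.mem_cons_self)
    have hw : Good w := fun c hc => h c (List.mem_cons_of_mem _ hc)
    simp only [subw, List.flatMap_cons, List.length_append, List.length_cons] at *
    rw [ih hw, hk.1]; ring

lemma good_subw (w : List Char) (h : Good w) : Good (subw w) := by
  intro c hc
  obtain ⟨ch, hch, hc'⟩ := List.mem_flatMap.mp hc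
  exact (key_step ch (h ch hch)).2 c hc'

lemma subw_prefix {u v : List Char} (h : u <+: v) : subw u <+: subw v := by
  obtain ⟨t, rfl⟩ := h
  rw [subw_append]; exact List.prefix_append _ _

lemma iterate_prefix {u v : List Char} (h : u <+: v) (k : Nat) :
    subw^[k] u <+: subw^[k] v := by
  induction k with
  | zero => exact h
  | succ k ih => rw [Function.iterate_succ_apply', Function.iterate_succ_apply']
                 exact subw_prefix ih

-- invariant of A's loop: w is the image of its own first i letters
def InvA (w : List Char) (i : Nat) : Prop :=
  Good w ∧ w.length = 2 * i ∧ 1 ≤ i ∧ w = subw (w.take i)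

lemma invA_init : InvA (mImg 'a') 1 :=
  ⟨by intro ch hch; fin_cases hch <;> decide, rfl, le_refl 1, rfl⟩

lemma invA_step (w : List Char) (i : Nat) (h : InvA w i) :
    ∃ (hi : i < w.length), 0 < (mImg w[i]).length ∧ InvA (w ++ mImg w[i]) (i + 1) := by
  obtain ⟨hg, hlen, h1, heq⟩ := h
  have hi : i < w.length := by omega
  refine ⟨hi, ?_, ?_⟩
  · rw [(key_step _ (hg _ (List.getElem_mem hi))).1]; norm_num
  · have hks := key_step _ (hg _ (List.getElem_mem hi))
    refine ⟨?_, ?_, by omega, ?_⟩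
    · intro c hc
      rcases List.mem_append.mp hc with hc | hc
      · exact hg c hc
      · exact hks.2 c hc
    · rw [List.length_append, hks.1]; omega
    · have ht : (w ++ mImg w[i]).take (i + 1) = w.take i ++ [w[i]] := by
        rw [List.take_append_of_le_length (by omega), List.take_add_one,
            List.getElem?_eq_getElem hi]
        rfl
      rw [ht, subw_append]
      have : subw [w[i]] = mImg w[i] := by simp [subw]
      rw [this, ← heq]

lemma invA_selfprefix {w : List Char} {i : Nat} (h : InvA w i) : w <+: subw w := by
  obtain ⟨-, -, -, heq⟩ := h
  have hsplit : subw w = subw (w.take i) ++ subw (w.drop i) := by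
    rw [← subw_append, List.take_append_drop]
  exact ⟨subw (w.drop i), by rw [hsplit, ← heq]⟩

lemma prefix_iterate_self {w : List Char} (hp : w <+: subw w) (k : Nat) :
    w <+: subw^[k] w := by
  induction k with
  | zero => exact List.prefix_refl _
  | succ k ih =>
    have h2 : subw^[k] w <+: subw^[k+1] w := by
      rw [Function.iterate_succ_apply]; exact iterate_prefix hp k
    exact ih.trans h2

lemma growA_spec (gl : Int) : ∀ (n : Nat) (w : List Char) (i : Nat),
    (gl - (w.length : Int)).toNat ≤ n → InvA w i →
    (∃ j, InvA (growA gl w i) j) ∧ w <+: growA gl w i ∧ gl ≤ ((growA gl w i).length : Int) := by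
  intro n
  induction n with
  | zero =>
    intro w i hn h
    rw [growA, dif_neg (by omega)]
    exact ⟨⟨i, h⟩, List.prefix_refl _, by omega⟩
  | succ n ih =>
    intro w i hn h
    by_cases hlt : (w.length : Int) < gl
    · obtain ⟨hi, hpos, h'⟩ := invA_step w i h
      rw [growA, dif_pos hlt, dif_pos hi, dif_pos hpos]
      have hn' : (gl - ((w ++ mImg w[i]).length : Int)).toNat ≤ n := by
        simp only [List.length_append]; omega
      obtain ⟨hj, hpre, hlen⟩ := ih (w ++ mImg w[i]) (i + 1) hn' h'
      exact ⟨hj, (List.prefix_append w (mImg w[i])).trans hpre, hlen⟩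
    · rw [growA, dif_neg hlt]
      exact ⟨⟨i, h⟩, List.prefix_refl _, by omega⟩

lemma growB_spec (gl : Int) : ∀ (n : Nat) (w : List Char),
    (gl - (w.length : Int)).toNat ≤ n → Good w → w ≠ [] →
    ∃ k, growB gl w = subw^[k] w ∧ gl ≤ ((growB gl w).length : Int) := by
  intro n
  induction n with
  | zero =>
    intro w hn hg hne
    rw [growB, dif_neg (by omega)]
    exact ⟨0, rfl, by omega⟩
  | succ n ih =>
    intro w hn hg hne
    have hlen2 : (subw w).length = 2 * w.length := len_subw w hg
    have hwpos : 0 < w.length := List.length_pos_iff.mpr hne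
    by_cases hlt : (w.length : Int) < gl
    · rw [growB, dif_pos ⟨hlt, by omega⟩]
      obtain ⟨k, hk, hl⟩ := ih (subw w) (by omega) (good_subw w hg)
        (by rw [← List.length_pos_iff]; omega)
      exact ⟨k + 1, by rw [hk, Function.iterate_succ_apply], hl⟩
    · rw [growB, dif_neg (by rw [not_and_or]; exact Or.inl hlt)]
      exact ⟨0, rfl, by omega⟩

lemma take_eq_of_both_prefix {u v t : List Char} (h1 : u <+: t) (h2 : v <+: t)
    (n : Nat) (hn1 : n ≤ u.length) (hn2 : n ≤ v.length) : u.take n = v.take n := by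
  rcases List.prefix_or_prefix_of_prefix h1 h2 with h | h <;> obtain ⟨r, rfl⟩ := h
  · rw [List.take_append_of_le_length hn1]
  · rw [List.take_append_of_le_length hn2]

lemma expand_eq (w : List Char) (n : Nat) (hn : n ≤ w.length) :
    (List.range n).flatMap (fun k => cImg (w.getD k ' ')) = (w.take n).flatMap cImg := by
  induction n with
  | zero => simp
  | succ n ih =>
    have hn' : n < w.length := by omega
    rw [List.range_succ, List.flatMap_append, ih (le_of_lt hn'), List.take_add_one,
        List.flatMap_append, List.getElem?_eq_getElem hn']
    simp [List.getD, List.getElem?_eq_getElem hn']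

-- the two loops produce the same expansion whenever both use the same positive genLen
lemma d_eq (gl : Int) (hgl : 0 < gl) :
    (PySem.List.pyRange 0 gl 1).foldl
        (fun d i => d ++ cImg (PySem.List.pyGetD (growA gl (mImg 'a') 1) i ' ')) []
      = (PySem.List.slice (growB gl ['a']) none (some gl)).flatMap cImg := by
  obtain ⟨⟨j, hinv⟩, hpre, hlenA⟩ := growA_spec gl _ (mImg 'a') 1 le_rfl invA_init
  obtain ⟨k, hkB, hlenB⟩ := growB_spec gl _ ['a'] le_rfl
    (by intro ch hch; fin_cases hch <;> decide) (by decide)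
  set wA := growA gl (mImg 'a') 1 with hwA
  set wB := growB gl ['a'] with hwB
  have hA1 : wA <+: subw^[k] wA := prefix_iterate_self (invA_selfprefix hinv) k
  have ha : ['a'] <+: wA := by
    refine List.IsPrefix.trans ?_ hpre
    exact ⟨['b'], by decide⟩
  have hB1 : wB <+: subw^[k] wA := by rw [hkB]; exact iterate_prefix ha k
  have htake : wA.take gl.toNat = wB.take gl.toNat :=
    take_eq_of_both_prefix hA1 hB1 _ (by omega) (by omega)
  rw [PySem.List.foldl_append_eq_flatMap, PySem.List.pyRange_one, List.nil_append,
      PySem.List.slice_to wB (le_of_lt hgl), List.flatMap_map]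
  simp only [zero_add, sub_zero, PySem.List.pyGetD_natCast]
  rw [expand_eq wA gl.toNat (by omega), htake]

-- B returns "" whenever the requested length is ≤ 0 (its genLen is then ≤ 0)
lemma B_empty (length : Int) (h : length ≤ 0) : gen_d_alt length = "" := by
  have hfd : PySem.Int.floordiv (length - 1) 64 = (length - 1) / 64 :=
    PySem.Int.floordiv_eq_ediv_of_pos (by norm_num)
  have hgl : PySem.Int.floordiv (length - 1) 64 + 1 ≤ 0 := by
    rw [hfd]
    have : (length - 1) / 64 ≤ -1 := by
      have := Int.ediv_le_ediv (by norm_num : (0:Int) < 64) (by omega : length - 1 ≤ -1)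
      simpa using this.trans (by decide : (-1:Int) / 64 ≤ -1)
    omega
  simp only [gen_d_alt]
  set gl := PySem.Int.floordiv (length - 1) 64 + 1 with hgldef
  have hB : growB gl ['a'] = ['a'] := by
    rw [growB, dif_neg]
    rintro ⟨h1, -⟩
    simp only [List.length_cons, List.length_nil] at h1
    omega
  rw [hB]
  have hsliceB : PySem.List.slice (['a'] : List Char) none (some gl) = [] := by
    by_cases h0 : gl = 0
    · rw [h0, PySem.List.slice_to (['a'] : List Char) (le_refl (0 : Int))]; rfl
    · have hk : 0 < (-gl).toNat := by omega
      have hgl' : gl = -(((-gl).toNat : Nat) : Int) := by omega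
      rw [hgl', PySem.List.slice_to_neg_natCast (['a'] : List Char) (-gl).toNat hk]
      have : (['a'] : List Char).length - (-gl).toNat = 0 := by
        simp only [List.length_cons, List.length_nil]; omega
      rw [this, List.take_zero]
  rw [hsliceB, List.flatMap_nil]
  by_cases h0 : length = 0
  · rw [h0, PySem.List.slice_to ([] : List Char) (le_refl (0 : Int))]; rfl
  · have hk : 0 < (-length).toNat := by omega
    have hl' : length = -(((-length).toNat : Nat) : Int) := by omega
    rw [hl', PySem.List.slice_to_neg_natCast ([] : List Char) (-length).toNat hk,
        List.take_nil]

-- A returns "" for length ≤ -63 (its genLen is then ≤ 0, so d = '')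
lemma A_empty (length : Int) (h : length ≤ -63) : gen_d length = "" := by
  have htd : PySem.Int.truncdiv (length - 1) 64 ≤ -1 := by
    show (length - 1).tdiv 64 ≤ -1
    have h1 : (length - 1).tdiv 64 = -((-(length - 1)).tdiv 64) := by
      rw [← Int.neg_tdiv, neg_neg]
    have h2 : (-(length - 1)).tdiv 64 = (-(length - 1)) / 64 :=
      Int.tdiv_eq_ediv_of_nonneg (by omega)
    have h3 : (1:Int) ≤ (-(length - 1)) / 64 := by
      have : (64:Int) / 64 ≤ (-(length - 1)) / 64 :=
        Int.ediv_le_ediv (by norm_num) (by omega)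
      simpa using this
    omega
  simp only [gen_d]
  rw [PySem.List.pyRange_one_eq_nil (by omega), List.foldl_nil]
  have hk : 0 < (-length).toNat := by omega
  have hl' : length = -(((-length).toNat : Nat) : Int) := by omega
  rw [hl', PySem.List.slice_to_neg_natCast ([] : List Char) (-length).toNat hk,
      List.take_nil]

-- for -62 ≤ length ≤ 0 A's genLen is 1, the loop never runs, and d = c['a']
lemma A_small (length : Int) (h1 : -62 ≤ length) (h2 : length ≤ 0) :
    gen_d length = String.ofList (PySem.List.slice (cImg 'a') none (some length)) := by
  have htd : PySem.Int.truncdiv (length - 1) 64 + 1 = 1 := by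
    have : (length - 1).tdiv 64 = -((-(length - 1)).tdiv 64) := by
      rw [← Int.neg_tdiv, neg_neg]
    have h2' : (-(length - 1)).tdiv 64 = (-(length - 1)) / 64 :=
      Int.tdiv_eq_ediv_of_nonneg (by omega)
    have h3 : (-(length - 1)) / 64 = 0 := by omega
    show (length - 1).tdiv 64 + 1 = 1
    omega
  have hG : growA 1 (mImg 'a') 1 = mImg 'a' := by
    rw [growA]; exact dif_neg (by decide)
  have hd : (PySem.List.pyRange 0 1 1).foldl
      (fun d i => d ++ cImg (PySem.List.pyGetD (mImg 'a') i ' ')) ([] : List Char)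
      = cImg 'a' := by decide
  simp only [gen_d, htd, hG, hd]

-- ===== VERDICT =====
theorem gen_d_spec : Claim_unchanged_gen_d := by
  intro length _hdom
  unfold Spec_gen_d
  intro hD
  unfold D_gen_d at hD
  by_cases hpos : 1 ≤ length
  · have htf : PySem.Int.truncdiv (length - 1) 64 = PySem.Int.floordiv (length - 1) 64 := by
      show (length - 1).tdiv 64 = _
      rw [PySem.Int.floordiv_eq_ediv_of_pos (by norm_num)]
      exact Int.tdiv_eq_ediv_of_nonneg (by omega)
    have hgl : 0 < PySem.Int.floordiv (length - 1) 64 + 1 := by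
      rw [PySem.Int.floordiv_eq_ediv_of_pos (by norm_num)]
      have : (0:Int) ≤ (length - 1) / 64 := Int.ediv_nonneg (by omega) (by norm_num)
      omega
    simp only [gen_d, gen_d_alt, htf]
    rw [d_eq _ hgl]
  · by_cases h0 : length = 0
    · subst h0
      rw [A_small 0 (by norm_num) le_rfl, B_empty 0 le_rfl]
      decide
    · have hle : length ≤ -63 := by omega
      rw [A_empty length hle, B_empty length (by omega)]

theorem gen_d_changed : Claim_changed_gen_d := by
  unfold Claim_changed_gen_d
  refine ⟨by decide, by decide, ?_, ?_, by decide⟩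
  · show gen_d (-62) = "+0"
    rw [A_small (-62) le_rfl (by norm_num)]
    decide
  · exact B_empty (-62) (by norm_num)

theorem gen_d_tight : Claim_exact_gen_d := by
  intro length _hdom hD
  obtain ⟨h1, h2⟩ := hD
  rw [A_small length (by omega) (by omega), B_empty length (by omega)]
  intro heq
  have hl := congrArg String.toList heq
  rw [String.toList_ofList] at hl
  have hk : 0 < (-length).toNat := by omega
  have hl' : length = -(((-length).toNat : Nat) : Int) := by omega
  rw [hl', PySem.List.slice_to_neg_natCast (cImg 'a') (-length).toNat hk] at hl
  have h64 : (cImg 'a').length = 64 := by decide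
  have hlen := congrArg List.length hl
  rw [List.length_take, h64] at hlen
  simp only [String.toList] at hlen
  have : (-length).toNat ≤ 62 := by omega
  simp at hlen
  omega
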